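-- pv_equiv track=rewrite | github.com/KhizarA77/Competitive-Programming | wk1/secretmessage.py | secret
-- ===== SOURCE A (Python) =====
-- import math
--
-- def secret(N, messages):
--     returnArr = []
--     for i in range(0, len(messages)):
--         message = messages[i]
--         L = len(message)
--         M = int(math.ceil(math.sqrt(L)))
--         astericMessage = message + '*'*M
--         matrix = [[0] * M for a in range(M)]
--         counter = 0
--
--         # Create a matrix with the stars
--         for j in range(0, M):
--             for k in range(0, M):
--                 matrix[j][k] = astericMessage[counter]
--                 counter += 1
--         # Rotate the matrix 90 degrees clockwise
--         encryptedMatrix = [[0] * M for a in range(M)]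
--
--         for j in range(0, M):
--             for k in range(0, M):
--                 encryptedMatrix[k][M-j-1] = matrix[j][k]
--
--
--         encryptedMessage = ''
--         for j in range(0,M):
--             for k in range(0, M):
--                 if encryptedMatrix[j][k] != '*':
--                     encryptedMessage += encryptedMatrix[j][k]
--
--         returnArr.append(encryptedMessage)
--     return returnArr
-- ===== SOURCE B (Python) =====
-- import math
--
-- def secret(N, messages):
--     # Single pass per message: read the rotated cell directly via index arithmetic
--     # instead of building fill/rotate matrices. (Like A, raises IndexError when
--     # len(message)+M < M*M for M = ceil(sqrt(len(message))).)
--     res = []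
--     for message in messages:
--         M = math.ceil(math.sqrt(len(message)))
--         s = message + '*' * M
--         chars = []
--         for r in range(M):
--             for c in range(M):
--                 ch = s[(M - 1 - c) * M + r]
--                 if ch != '*':
--                     chars.append(ch)
--         res.append(''.join(chars))
--     return res
-- ===== Notes on version B (the rewrite author's own statement) =====
-- stated objective: simpler
-- what changed: B fuses A's three nested double-loops (fill an MxM matrix, rotate it into a second matrix, read it out) into one double loop that reads each rotated cell directly from the padded string via the index formula (M-1-c)*M+r, with no intermediate matrices.
import Mathlib
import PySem

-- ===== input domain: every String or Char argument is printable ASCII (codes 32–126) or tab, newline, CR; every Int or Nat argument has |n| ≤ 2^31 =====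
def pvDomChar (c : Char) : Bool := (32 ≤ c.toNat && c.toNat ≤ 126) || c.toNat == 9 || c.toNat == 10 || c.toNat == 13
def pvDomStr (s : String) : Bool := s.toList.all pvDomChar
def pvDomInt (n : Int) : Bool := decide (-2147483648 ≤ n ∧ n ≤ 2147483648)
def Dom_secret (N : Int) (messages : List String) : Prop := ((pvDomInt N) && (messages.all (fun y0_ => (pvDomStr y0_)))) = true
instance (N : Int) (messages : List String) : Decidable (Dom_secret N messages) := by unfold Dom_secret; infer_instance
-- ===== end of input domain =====

-- B reads each character of the clockwise-rotated square directly from the padded message via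
-- index arithmetic, with no fill/rotate matrices (objective: simpler).

-- shared helper: int(math.ceil(math.sqrt(L))) for a Nat L (exact: the least M with L ≤ M*M;
-- m = L always satisfies L ≤ m*m, so the scan never falls off the end)
def pvCeilSqrt (L : Nat) : Nat := (List.range (L + 1)).findIdx (fun m => L ≤ m * m)

-- ===== PORT A =====
-- '\x00' stands for Python's int 0 matrix placeholder; every cell is written before being read.
-- inner fill loop: for k in range(M): matrix[j][k] = astericMessage[counter]; counter += 1
def secretFillK (s : List Char) (j : Nat) : List Nat → List (List Char) × Nat → Option (List (List Char) × Nat)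
  | [], st => some st
  | k :: ks, (mat, cnt) =>
    match PySem.List.pyGet? s (Int.ofNat cnt) with
    | none => none
    | some ch => secretFillK s j ks (mat.set j ((mat.getD j []).set k ch), cnt + 1)

def secretFillJ (s : List Char) (M : Nat) : List Nat → List (List Char) × Nat → Option (List (List Char) × Nat)
  | [], st => some st
  | j :: js, st =>
    match secretFillK s j (List.range M) st with
    | none => none
    | some st' => secretFillJ s M js st'

-- rotate: encryptedMatrix[k][M-j-1] = matrix[j][k]  (all indices in range by construction)
def secretRotK (mat : List (List Char)) (M j : Nat) : List Nat → List (List Char) → List (List Char)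
  | [], em => em
  | k :: ks, em =>
    secretRotK mat M j ks (em.set k ((em.getD k []).set (M - j - 1) ((mat.getD j []).getD k '\x00')))

def secretRotJ (mat : List (List Char)) (M : Nat) : List Nat → List (List Char) → List (List Char)
  | [], em => em
  | j :: js, em => secretRotJ mat M js (secretRotK mat M j (List.range M) em)

-- read out: if encryptedMatrix[j][k] != '*': encryptedMessage += encryptedMatrix[j][k]
def secretReadK (em : List (List Char)) (j : Nat) : List Nat → List Char → List Char
  | [], acc => acc
  | k :: ks, acc =>
    secretReadK em j ks
      (if (em.getD j []).getD k '\x00' ≠ '*' then acc ++ [(em.getD j []).getD k '\x00'] else acc)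

def secretReadJ (em : List (List Char)) (M : Nat) : List Nat → List Char → List Char
  | [], acc => acc
  | j :: js, acc => secretReadJ em M js (secretReadK em j (List.range M) acc)

def secretEnc (m : String) : Option String :=
  let L := m.toList.length
  let M := pvCeilSqrt L
  let s := m.toList ++ List.replicate M '*'
  match secretFillJ s M (List.range M) (List.replicate M (List.replicate M '\x00'), 0) with
  | none => none
  | some (mat, _) =>
    let em := secretRotJ mat M (List.range M) (List.replicate M (List.replicate M '\x00'))
    some (String.ofList (secretReadJ em M (List.range M) []))

def secret (N : Int) (messages : List String) : List String :=
  (messages.mapM secretEnc).getD []   -- the 'none' (IndexError) default is unreachable under Pre_secret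

-- ===== PORT B =====
def secretAltK (s : List Char) (M r : Nat) : List Nat → List Char → Option (List Char)
  | [], acc => some acc
  | c :: cs, acc =>
    match PySem.List.pyGet? s (Int.ofNat ((M - 1 - c) * M + r)) with
    | none => none
    | some ch => secretAltK s M r cs (if ch ≠ '*' then acc ++ [ch] else acc)

def secretAltJ (s : List Char) (M : Nat) : List Nat → List Char → Option (List Char)
  | [], acc => some acc
  | r :: rs, acc =>
    match secretAltK s M r (List.range M) acc with
    | none => none
    | some acc' => secretAltJ s M rs acc'

def secretAltEnc (m : String) : Option String :=
  let M := pvCeilSqrt m.toList.length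
  let s := m.toList ++ List.replicate M '*'
  (secretAltJ s M (List.range M) []).map String.ofList

def secret_alt (N : Int) (messages : List String) : List String :=
  (messages.mapM secretAltEnc).getD []   -- the 'none' (IndexError) default is unreachable under Pre_secret

-- ===== PRECONDITION & SPEC =====
-- Pre_ excludes exactly the inputs on which A raises IndexError: any message whose length L
-- satisfies L + M < M*M for M = ceil(sqrt(L)) (e.g. L = 5, 10, 11, 17, 18, 19, ...); B raises there too.
def Pre_secret (N : Int) (messages : List String) : Prop :=
  ∀ m ∈ messages,
    pvCeilSqrt m.toList.length * pvCeilSqrt m.toList.length ≤ m.toList.length + pvCeilSqrt m.toList.length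

instance (N : Int) (messages : List String) : Decidable (Pre_secret N messages) := by
  unfold Pre_secret; infer_instance

def pvWitness_secret : Int × List String := (1, ["abcd", "", "magic square!"])

def Spec_secret (N : Int) (messages : List String) (out : List String) : Prop := out = secret_alt N messages
instance (N : Int) (messages : List String) (out : List String) : Decidable (Spec_secret N messages out) := by unfold Spec_secret; infer_instance

-- ===== CLAIM (what is proved, stated in full; the proofs are below) =====
def Claim_equal_secret : Prop := ∀ (N : Int) (messages : List String), Dom_secret N messages → Pre_secret N messages → Spec_secret N messages (secret N messages)

-- ===== LEMMAS AND PROOFS =====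

-- every matrix A builds is (List.range M).map of a row function; pvMkMat names that shape
def pvMkMat (M : Nat) (F : Nat → Nat → Char) : List (List Char) :=
  (List.range M).map (fun j => (List.range M).map (F j))

theorem pvMkMat_getD {M : Nat} (F : Nat → Nat → Char) {j : Nat} (hj : j < M) :
    (pvMkMat M F).getD j [] = (List.range M).map (F j) := by
  unfold pvMkMat
  rw [List.getD_eq_getElem?_getD, List.getElem?_map]
  simp [hj]

theorem pv_getD_map_range {α} {M k : Nat} (f : Nat → α) (d : α) (hk : k < M) :
    ((List.range M).map f).getD k d = f k := by
  rw [List.getD_eq_getElem?_getD, List.getElem?_map]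
  simp [hk]

theorem pv_set_map_range {α} {M i : Nat} (f : Nat → α) (v : α) :
    ((List.range M).map f).set i v = (List.range M).map (fun n => if n = i then v else f n) := by
  apply List.ext_getElem
  · simp
  · intro n h1 h2
    simp only [List.getElem_set, List.getElem_map, List.getElem_range]
    split_ifs with ha hb hb
    · rfl
    · exact absurd ha.symm hb
    · exact absurd hb.symm ha
    · rfl

theorem pvMkMat_congr {M : Nat} {F G : Nat → Nat → Char}
    (h : ∀ j k, j < M → k < M → F j k = G j k) : pvMkMat M F = pvMkMat M G := by
  unfold pvMkMat
  refine List.map_congr_left ?_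
  intro j hj
  refine List.map_congr_left ?_
  intro k hk
  exact h j k (List.mem_range.mp hj) (List.mem_range.mp hk)

theorem pvMkMat_set_row {M j : Nat} (F : Nat → Nat → Char) (g : Nat → Char) :
    (pvMkMat M F).set j ((List.range M).map g) =
      pvMkMat M (fun j' k => if j' = j then g k else F j' k) := by
  unfold pvMkMat
  rw [pv_set_map_range]
  refine List.map_congr_left ?_
  intro n _
  by_cases h : n = j <;> simp [h]

theorem pv_fillK_spec (s : List Char) (M j : Nat) (hj : j < M) :
    ∀ (n k0 cnt : Nat) (F : Nat → Nat → Char), k0 + n ≤ M → cnt + n ≤ s.length →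
    secretFillK s j (List.range' k0 n) (pvMkMat M F, cnt) =
      some (pvMkMat M (fun j' k =>
        if j' = j ∧ k0 ≤ k ∧ k < k0 + n then s.getD (cnt + (k - k0)) '\x00' else F j' k), cnt + n) := by
  intro n
  induction n with
  | zero =>
    intro k0 cnt F _ _
    have he : pvMkMat M (fun j' k =>
        if j' = j ∧ k0 ≤ k ∧ k < k0 + 0 then s.getD (cnt + (k - k0)) '\x00' else F j' k)
        = pvMkMat M F := by
      refine pvMkMat_congr ?_
      intro j' k _ _
      rw [if_neg (by omega)]
    rw [List.range'_zero, he]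
    rfl
  | succ n ih =>
    intro k0 cnt F hk0 hcnt
    rw [List.range'_succ]
    have hlt : cnt < s.length := by omega
    have hget : PySem.List.pyGet? s (Int.ofNat cnt) = some (s.getD cnt '\x00') := by
      have h1 := PySem.List.pyGet?_natCast (xs := s) (n := cnt)
      rw [show (Int.ofNat cnt) = ((cnt : Nat) : Int) from rfl, h1]
      rw [List.getD_eq_getElem?_getD]
      simp [hlt]
    simp only [secretFillK, hget]
    rw [pvMkMat_getD F hj, pv_set_map_range, pvMkMat_set_row]
    have hF' : pvMkMat M (fun j' k => if j' = j then (if k = k0 then s.getD cnt '\x00' else F j k) else F j' k)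
        = pvMkMat M (fun j' k => if j' = j ∧ k = k0 then s.getD cnt '\x00' else F j' k) := by
      refine pvMkMat_congr ?_
      intro j' k _ _
      by_cases h : j' = j <;> simp [h]
    rw [hF', ih (k0+1) (cnt+1) _ (by omega) (by omega)]
    refine congrArg some (Prod.ext ?_ (by omega))
    refine pvMkMat_congr ?_
    intro j' k _ _
    by_cases hjj : j' = j
    · subst hjj
      by_cases h1 : k0 + 1 ≤ k ∧ k < k0 + 1 + n
      · rw [if_pos ⟨rfl, h1⟩, if_pos ⟨rfl, by omega, by omega⟩]
        have h2 : cnt + 1 + (k - (k0 + 1)) = cnt + (k - k0) := by omega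
        rw [h2]
      · rw [if_neg (by tauto)]
        by_cases h2 : k = k0
        · rw [if_pos ⟨rfl, h2⟩, if_pos ⟨rfl, by omega, by omega⟩, h2]
          simp
        · rw [if_neg (by tauto), if_neg (by rintro ⟨-, h3, h4⟩; omega)]
    · simp only [hjj, false_and, if_false]

theorem pv_fillJ_spec (s : List Char) (M : Nat) :
    ∀ (n j0 cnt : Nat) (F : Nat → Nat → Char), j0 + n ≤ M → cnt + n * M ≤ s.length →
    secretFillJ s M (List.range' j0 n) (pvMkMat M F, cnt) =
      some (pvMkMat M (fun j k =>
        if j0 ≤ j ∧ j < j0 + n then s.getD (cnt + (j - j0) * M + k) '\x00' else F j k), cnt + n * M) := by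
  intro n
  induction n with
  | zero =>
    intro j0 cnt F _ _
    have he : pvMkMat M (fun j k =>
        if j0 ≤ j ∧ j < j0 + 0 then s.getD (cnt + (j - j0) * M + k) '\x00' else F j k)
        = pvMkMat M F := by
      refine pvMkMat_congr ?_
      intro j k _ _
      rw [if_neg (by omega)]
    rw [List.range'_zero, he, Nat.zero_mul, Nat.add_zero]
    rfl
  | succ n ih =>
    intro j0 cnt F hj0 hcnt
    rw [List.range'_succ]
    have hj : j0 < M := by omega
    have hfk := pv_fillK_spec s M j0 hj M 0 cnt F (by omega) (by nlinarith)
    simp only [secretFillJ, List.range_eq_range', hfk]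
    have hmid : pvMkMat M (fun j' k => if j' = j0 ∧ 0 ≤ k ∧ k < 0 + M then s.getD (cnt + (k - 0)) '\x00' else F j' k)
        = pvMkMat M (fun j' k => if j' = j0 then s.getD (cnt + k) '\x00' else F j' k) := by
      refine pvMkMat_congr ?_
      intro j' k _ hk
      by_cases h : j' = j0
      · rw [if_pos ⟨h, by omega, by omega⟩, if_pos h]
        simp
      · rw [if_neg (by tauto), if_neg h]
    rw [hmid, ih (j0+1) (cnt+M) _ (by omega) (by nlinarith)]
    refine congrArg some (Prod.ext ?_ (by ring_nf))
    refine pvMkMat_congr ?_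
    intro j k _ hk
    by_cases h1 : j0 + 1 ≤ j ∧ j < j0 + 1 + n
    · rw [if_pos h1, if_pos (show j0 ≤ j ∧ j < j0 + (n+1) by omega)]
      have h2 : cnt + M + (j - (j0 + 1)) * M + k = cnt + (j - j0) * M + k := by
        have hjj : j - j0 = (j - (j0+1)) + 1 := by omega
        rw [hjj, Nat.succ_mul]
        ring_nf
      rw [h2]
    · rw [if_neg h1]
      by_cases h2 : j = j0
      · rw [if_pos h2, if_pos (show j0 ≤ j ∧ j < j0 + (n+1) by omega), h2]
        simp
      · rw [if_neg h2, if_neg (by rintro ⟨h3, h4⟩; omega)]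

theorem pv_rotK_spec (M j : Nat) (F : Nat → Nat → Char) (hj : j < M) :
    ∀ (n k0 : Nat) (G : Nat → Nat → Char), k0 + n ≤ M →
    secretRotK (pvMkMat M F) M j (List.range' k0 n) (pvMkMat M G) =
      pvMkMat M (fun r c => if k0 ≤ r ∧ r < k0 + n ∧ c = M - j - 1 then F j r else G r c) := by
  intro n
  induction n with
  | zero =>
    intro k0 G _
    rw [List.range'_zero]
    show pvMkMat M G = _
    refine pvMkMat_congr ?_
    intro r c _ _
    rw [if_neg (by omega)]
  | succ n ih =>
    intro k0 G hk0
    rw [List.range'_succ]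
    have hk : k0 < M := by omega
    show secretRotK (pvMkMat M F) M j (List.range' (k0+1) n) _ = _
    rw [pvMkMat_getD G hk, pvMkMat_getD F hj, pv_getD_map_range (F j) '\x00' hk,
        pv_set_map_range, pvMkMat_set_row, show (fun j' k => if j' = k0 then (if k = M - j - 1 then F j k0 else G k0 k) else G j' k)
          = (fun r c => if r = k0 ∧ c = M - j - 1 then F j r else G r c) from ?_, ih (k0+1) _ (by omega)]
    · refine pvMkMat_congr ?_
      intro r c _ _
      by_cases h1 : k0 + 1 ≤ r ∧ r < k0 + 1 + n ∧ c = M - j - 1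
      · rw [if_pos h1, if_pos ⟨by omega, by omega, h1.2.2⟩]
      · rw [if_neg h1]
        by_cases h2 : r = k0 ∧ c = M - j - 1
        · rw [if_pos h2, if_pos ⟨by omega, by omega, h2.2⟩, h2.1]
        · have hno : ¬(k0 ≤ r ∧ r < k0 + (n + 1) ∧ c = M - j - 1) := by
            rintro ⟨ha, hb, hc⟩
            rcases Nat.eq_or_lt_of_le ha with he | hlt
            · exact h2 ⟨he.symm, hc⟩
            · exact h1 ⟨hlt, by omega, hc⟩
          rw [if_neg h2, if_neg hno]
    · funext r c
      by_cases h : r = k0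
      · subst h
        by_cases h2 : c = M - j - 1
        · rw [if_pos rfl, if_pos h2, if_pos ⟨rfl, h2⟩]
        · rw [if_pos rfl, if_neg h2, if_neg (by tauto)]
      · rw [if_neg h, if_neg (by tauto)]

theorem pv_rotJ_spec (M : Nat) (F : Nat → Nat → Char) :
    ∀ (n j0 : Nat) (G : Nat → Nat → Char), j0 + n ≤ M →
    secretRotJ (pvMkMat M F) M (List.range' j0 n) (pvMkMat M G) =
      pvMkMat M (fun r c => if M - (j0 + n) ≤ c ∧ c < M - j0 then F (M - 1 - c) r else G r c) := by
  intro n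
  induction n with
  | zero =>
    intro j0 G _
    rw [List.range'_zero]
    show pvMkMat M G = _
    refine pvMkMat_congr ?_
    intro r c _ _
    rw [if_neg (by omega)]
  | succ n ih =>
    intro j0 G hj0
    rw [List.range'_succ]
    have hrk := pv_rotK_spec M j0 F (by omega) M 0 G (by omega)
    simp only [secretRotJ, List.range_eq_range', hrk]
    have hmid : pvMkMat M (fun r c => if 0 ≤ r ∧ r < 0 + M ∧ c = M - j0 - 1 then F j0 r else G r c)
        = pvMkMat M (fun r c => if c = M - j0 - 1 then F (M - 1 - c) r else G r c) := by
      refine pvMkMat_congr ?_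
      intro r c hr _
      by_cases h : c = M - j0 - 1
      · rw [if_pos ⟨by omega, by omega, h⟩, if_pos h]
        congr 1
        omega
      · rw [if_neg (by tauto), if_neg h]
    rw [hmid, ih (j0+1) _ (by omega)]
    refine pvMkMat_congr ?_
    intro r c _ hc
    by_cases h1 : M - (j0 + 1 + n) ≤ c ∧ c < M - (j0 + 1)
    · rw [if_pos h1, if_pos (show M - (j0 + (n+1)) ≤ c ∧ c < M - j0 by omega)]
    · rw [if_neg h1]
      by_cases h2 : c = M - j0 - 1
      · rw [if_pos h2, if_pos (show M - (j0 + (n+1)) ≤ c ∧ c < M - j0 by omega)]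
      · rw [if_neg h2, if_neg (by rintro ⟨ha, hb⟩; omega)]

theorem pv_readK_spec (em : List (List Char)) (j : Nat) :
    ∀ (ks : List Nat) (acc : List Char),
    secretReadK em j ks acc =
      acc ++ (ks.map (fun k => (em.getD j []).getD k '\x00')).filter (· ≠ '*') := by
  intro ks
  induction ks with
  | nil => intro acc; simp [secretReadK]
  | cons k ks ih =>
    intro acc
    simp only [secretReadK, ih, List.map_cons]
    by_cases h : (em.getD j []).getD k '\x00' = '*'
    · rw [h]
      simp
    · rw [if_pos h, List.filter_cons_of_pos (by simpa using h), List.append_assoc,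
          List.singleton_append]

theorem pv_readJ_spec (em : List (List Char)) (M : Nat) :
    ∀ (js : List Nat) (acc : List Char),
    secretReadJ em M js acc =
      acc ++ js.flatMap (fun j =>
        ((List.range M).map (fun k => (em.getD j []).getD k '\x00')).filter (· ≠ '*')) := by
  intro js
  induction js with
  | nil => intro acc; simp [secretReadJ]
  | cons j js ih => intro acc; simp [secretReadJ, pv_readK_spec, ih]

theorem pv_altK_spec (s : List Char) (M r : Nat) (hr : r < M) (hs : M * M ≤ s.length) :
    ∀ (cs : List Nat) (acc : List Char), (∀ c ∈ cs, c < M) →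
    secretAltK s M r cs acc =
      some (acc ++ (cs.map (fun c => s.getD ((M - 1 - c) * M + r) '\x00')).filter (· ≠ '*')) := by
  intro cs
  induction cs with
  | nil => intro acc _; simp [secretAltK]
  | cons c cs ih =>
    intro acc hcs
    have hc : c < M := hcs c (by simp)
    have hidx : (M - 1 - c) * M + r < s.length := by
      have h1 : (M - 1 - c) * M + r < M * M := by
        have h0 : M - 1 - c ≤ M - 1 := by omega
        calc (M - 1 - c) * M + r ≤ (M - 1) * M + r :=
              Nat.add_le_add_right (Nat.mul_le_mul_right M h0) r
          _ < (M - 1) * M + M := by omega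
          _ = (M - 1 + 1) * M := by ring
          _ = M * M := by rw [show M - 1 + 1 = M from by omega]
      omega
    have hget : PySem.List.pyGet? s (Int.ofNat ((M - 1 - c) * M + r))
        = some (s.getD ((M - 1 - c) * M + r) '\x00') := by
      have h1 := PySem.List.pyGet?_natCast (xs := s) (n := (M - 1 - c) * M + r)
      rw [show (Int.ofNat ((M - 1 - c) * M + r)) = (((M - 1 - c) * M + r : Nat) : Int) from rfl, h1]
      rw [List.getD_eq_getElem?_getD]
      simp [hidx]
    simp only [secretAltK, hget, ih _ (fun c hc => hcs c (by simp [hc])), List.map_cons]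
    by_cases h : s.getD ((M - 1 - c) * M + r) '\x00' = '*'
    · rw [h]
      simp
    · rw [if_pos h, List.filter_cons_of_pos (by simpa using h), List.append_assoc,
          List.singleton_append]

theorem pv_altJ_spec (s : List Char) (M : Nat) (hs : M * M ≤ s.length) :
    ∀ (rs : List Nat) (acc : List Char), (∀ r ∈ rs, r < M) →
    secretAltJ s M rs acc =
      some (acc ++ rs.flatMap (fun r =>
        ((List.range M).map (fun c => s.getD ((M - 1 - c) * M + r) '\x00')).filter (· ≠ '*'))) := by
  intro rs
  induction rs with
  | nil => intro acc _; simp [secretAltJ]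
  | cons r rs ih =>
    intro acc hrs
    have hr : r < M := hrs r (by simp)
    simp only [secretAltJ,
      pv_altK_spec s M r hr hs (List.range M) acc (fun c hc => List.mem_range.mp hc),
      ih _ (fun r hr => hrs r (by simp [hr]))]
    simp

theorem pv_enc_core (s : List Char) (M : Nat) (hMM : M * M ≤ s.length) :
    (match secretFillJ s M (List.range M) (List.replicate M (List.replicate M '\x00'), 0) with
      | none => none
      | some (mat, _) =>
        some (String.ofList (secretReadJ
          (secretRotJ mat M (List.range M) (List.replicate M (List.replicate M '\x00')))
          M (List.range M) [])))
    = (secretAltJ s M (List.range M) []).map String.ofList := by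
  have hrepl : List.replicate M (List.replicate M '\x00') = pvMkMat M (fun _ _ => '\x00') := by
    simp [pvMkMat, List.map_const']
  simp only [hrepl, List.range_eq_range',
    pv_fillJ_spec s M M 0 0 _ (by omega) (by simpa using hMM)]
  have hfill : pvMkMat M (fun j k =>
      if 0 ≤ j ∧ j < 0 + M then s.getD (0 + (j - 0) * M + k) '\x00' else '\x00')
      = pvMkMat M (fun j k => s.getD (j * M + k) '\x00') := by
    refine pvMkMat_congr ?_
    intro j k hj _
    rw [if_pos ⟨by omega, by omega⟩]
    norm_num
  rw [hfill, pv_rotJ_spec M _ M 0 _ (by omega)]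
  have hrot : pvMkMat M (fun r c =>
      if M - (0 + M) ≤ c ∧ c < M - 0 then s.getD ((M - 1 - c) * M + r) '\x00' else '\x00')
      = pvMkMat M (fun r c => s.getD ((M - 1 - c) * M + r) '\x00') := by
    refine pvMkMat_congr ?_
    intro r c _ hc
    rw [if_pos ⟨by omega, by omega⟩]
  rw [hrot, pv_readJ_spec,
      pv_altJ_spec s M hMM (List.range' 0 M) [] (fun r hr => by simpa using List.mem_range'_1.mp hr)]
  simp only [List.nil_append, Option.map_some]
  congr 2
  refine List.flatMap_congr ?_
  intro r hr
  have hrM : r < M := by simpa using List.mem_range'_1.mp hr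
  congr 1
  refine List.map_congr_left ?_
  intro k hk
  have hkM : k < M := List.mem_range.mp hk
  rw [pvMkMat_getD _ hrM, pv_getD_map_range _ '\x00' hkM]

theorem pv_enc_eq (m : String)
    (hpre : pvCeilSqrt m.toList.length * pvCeilSqrt m.toList.length
            ≤ m.toList.length + pvCeilSqrt m.toList.length) :
    secretEnc m = secretAltEnc m := by
  unfold secretEnc secretAltEnc
  exact pv_enc_core (m.toList ++ List.replicate (pvCeilSqrt m.toList.length) '*')
    (pvCeilSqrt m.toList.length) (by simpa using hpre)


-- ===== VERDICT (by name: the statement is the Claim_ definition above) =====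
theorem secret_spec : Claim_equal_secret := by
  intro N messages _ hpre
  unfold Spec_secret secret secret_alt
  have h : ∀ (ms : List String), (∀ m ∈ ms,
      pvCeilSqrt m.toList.length * pvCeilSqrt m.toList.length
        ≤ m.toList.length + pvCeilSqrt m.toList.length) →
      ms.mapM secretEnc = ms.mapM secretAltEnc := by
    intro ms
    induction ms with
    | nil => intro _; rfl
    | cons m ms ih =>
      intro hall
      simp only [List.mapM_cons, pv_enc_eq m (hall m (by simp)),
        ih (fun x hx => hall x (by simp [hx]))]
  rw [h messages hpre]
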